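-- pv_equiv track=rewrite | github.com/ericrmc/design-system | selvedge/context_cmd.py | _render_pack
-- ===== SOURCE A (Python) =====
-- from typing import List, Optional
--
-- def _render_pack(
--     target_aliases: List[str], floor_aliases: List[str], per_target: dict
-- ) -> str:
--     lines = [
--         "# Assessment context pack (S195 DV-S195-1, T-38)",
--         "",
--         "Substrate-presented context for the open session; agents must read this "
--         "before submitting the assessment. The receipt nonce binds this packet "
--         "to the assessment-submit (single-use atomic-consume).",
--         "",
--         f"## Substrate-presented floor",
--         "",
--     ]
--     if floor_aliases:
--         lines.append("Undisposed forward-references + open HIGH-priority issues:")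
--         for a in floor_aliases:
--             lines.append(f"- {a}")
--     else:
--         lines.append("(no undisposed FRs or open HIGH OIs at this time)")
--     lines.append("")
--
--     lines.append(f"## Targets ({len(target_aliases)})")
--     lines.append("")
--     if not target_aliases:
--         lines.append("(no --target provided; pack scoped to the floor only)")
--         lines.append("")
--         return "\n".join(lines).rstrip() + "\n"
--
--     for ta in target_aliases:
--         lines.append(f"### {ta}")
--         lines.append("")
--         srcs = per_target.get(ta, [])
--         if not srcs:
--             lines.append(
--                 f"(no anchored harvest, citing decisions, active specs, or "
--                 f"supersessions found for {ta}; if alias is an issue or FR it "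
--                 f"does not register in objects.alias per DV-S189-1)"
--             )
--             lines.append("")
--             continue
--         by_kind: dict[str, list[dict]] = {}
--         for s in srcs:
--             by_kind.setdefault(s["kind"], []).append(s)
--         for kind in (
--             "anchored_harvest",
--             "decision_citing",
--             "active_spec",
--             "supersession",
--             "unresolved_target",
--         ):
--             if not by_kind.get(kind):
--                 continue
--             lines.append(f"**{kind}**")
--             for s in by_kind[kind]:
--                 lines.append(f"- {s['body']}")
--             lines.append("")
--     return "\n".join(lines).rstrip() + "\n"
-- ===== SOURCE B (Python) =====
-- from typing import List
--
-- _KINDS = (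
--     "anchored_harvest",
--     "decision_citing",
--     "active_spec",
--     "supersession",
--     "unresolved_target",
-- )
--
--
-- def _kind_lines(srcs, kind):
--     matched = [s for s in srcs if s["kind"] == kind]
--     if not matched:
--         return []
--     return [f"**{kind}**"] + [f"- {s['body']}" for s in matched] + [""]
--
--
-- def _target_section(per_target, ta):
--     srcs = per_target.get(ta, [])
--     if not srcs:
--         return [
--             f"### {ta}",
--             "",
--             f"(no anchored harvest, citing decisions, active specs, or "
--             f"supersessions found for {ta}; if alias is an issue or FR it "
--             f"does not register in objects.alias per DV-S189-1)",
--             "",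
--         ]
--     return [f"### {ta}", ""] + [
--         ln for kind in _KINDS for ln in _kind_lines(srcs, kind)
--     ]
--
--
-- def _render_pack(
--     target_aliases: List[str], floor_aliases: List[str], per_target: dict
-- ) -> str:
--     floor = (
--         ["Undisposed forward-references + open HIGH-priority issues:"]
--         + [f"- {a}" for a in floor_aliases]
--         if floor_aliases
--         else ["(no undisposed FRs or open HIGH OIs at this time)"]
--     )
--     head = [
--         "# Assessment context pack (S195 DV-S195-1, T-38)",
--         "",
--         "Substrate-presented context for the open session; agents must read this "
--         "before submitting the assessment. The receipt nonce binds this packet "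
--         "to the assessment-submit (single-use atomic-consume).",
--         "",
--         f"## Substrate-presented floor",
--         "",
--     ] + floor + ["", f"## Targets ({len(target_aliases)})", ""]
--     if not target_aliases:
--         tail = ["(no --target provided; pack scoped to the floor only)", ""]
--     else:
--         tail = [ln for ta in target_aliases for ln in _target_section(per_target, ta)]
--     return "\n".join(head + tail).rstrip() + "\n"
-- ===== Notes on version B (the rewrite author's own statement) =====
-- stated objective: alternative
-- what changed: B drops A's single mutable lines accumulator and its per-target by_kind grouping dict: it composes the pack from per-target section lists (a flatMap of section builders), selecting each kind's sources by a direct scan/filter of srcs per kind in the fixed kind order.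
import Mathlib
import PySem

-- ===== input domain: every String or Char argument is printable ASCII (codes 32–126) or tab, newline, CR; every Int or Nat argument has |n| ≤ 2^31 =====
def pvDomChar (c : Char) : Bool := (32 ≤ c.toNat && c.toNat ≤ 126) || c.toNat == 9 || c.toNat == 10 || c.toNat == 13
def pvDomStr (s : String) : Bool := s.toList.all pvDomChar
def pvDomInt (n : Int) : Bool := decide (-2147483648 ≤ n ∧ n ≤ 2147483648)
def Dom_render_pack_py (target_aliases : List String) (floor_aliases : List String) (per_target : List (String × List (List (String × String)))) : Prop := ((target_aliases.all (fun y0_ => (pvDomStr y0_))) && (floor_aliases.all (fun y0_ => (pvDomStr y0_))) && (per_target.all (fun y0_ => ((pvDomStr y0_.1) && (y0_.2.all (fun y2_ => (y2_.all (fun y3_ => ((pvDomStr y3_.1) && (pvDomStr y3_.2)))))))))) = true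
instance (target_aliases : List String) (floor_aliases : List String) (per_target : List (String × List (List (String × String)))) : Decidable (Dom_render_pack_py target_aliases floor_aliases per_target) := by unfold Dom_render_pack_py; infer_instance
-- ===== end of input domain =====

-- B replaces A's build-a-by_kind-dict-then-iterate strategy by composing the pack from
-- per-target section lists (flatMap) with a direct per-kind scan of the sources; objective: alternative decomposition, same cost.

-- shared leaf helpers (string constants and dict-style lookups both ports use)
def pvKinds : List String :=
  ["anchored_harvest", "decision_citing", "active_spec", "supersession", "unresolved_target"]

def pvHeader : List String :=
  ["# Assessment context pack (S195 DV-S195-1, T-38)",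
   "",
   "Substrate-presented context for the open session; agents must read this before submitting the assessment. The receipt nonce binds this packet to the assessment-submit (single-use atomic-consume).",
   "",
   "## Substrate-presented floor",
   ""]

def pvFloorHdr : String := "Undisposed forward-references + open HIGH-priority issues:"
def pvNoFloor : String := "(no undisposed FRs or open HIGH OIs at this time)"
def pvNoTarget : String := "(no --target provided; pack scoped to the floor only)"
def pvNoSrcMsg (ta : String) : String :=
  "(no anchored harvest, citing decisions, active specs, or supersessions found for " ++ ta ++ "; if alias is an issue or FR it does not register in objects.alias per DV-S189-1)"

-- source dicts: s["kind"] / s["body"] (first-match lookup; default only reachable outside Pre_)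
def pvKindOf (s : List (String × String)) : String := (PySem.Dict.mk s).getD "kind" ""
def pvBodyOf (s : List (String × String)) : String := (PySem.Dict.mk s).getD "body" ""
-- per_target.get(ta, [])
def pvGetSrcs (per_target : List (String × List (List (String × String)))) (ta : String) : List (List (String × String)) :=
  (PySem.Dict.mk per_target).getD ta []

-- ===== PORT A =====
def render_pack_py (target_aliases : List String) (floor_aliases : List String) (per_target : List (String × List (List (String × String)))) : String :=
  let lines := pvHeader
  let lines :=
    if floor_aliases.isEmpty then lines ++ [pvNoFloor]
    else floor_aliases.foldl (fun acc a => acc ++ ["- " ++ a]) (lines ++ [pvFloorHdr])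
  let lines := lines ++ [""]
  let lines := lines ++ ["## Targets (" ++ PySem.Int.toStr (target_aliases.length : Int) ++ ")", ""]
  if target_aliases.isEmpty then
    PySem.Str.rstrip (PySem.Str.join "\n" (lines ++ [pvNoTarget, ""])) ++ "\n"
  else
    let lines := target_aliases.foldl (fun acc ta =>
      let acc := acc ++ ["### " ++ ta, ""]
      let srcs := pvGetSrcs per_target ta
      if srcs.isEmpty then acc ++ [pvNoSrcMsg ta, ""]
      else
        let by_kind := srcs.foldl (fun d s => d.modify (pvKindOf s) [] (· ++ [s])) PySem.Dict.empty
        pvKinds.foldl (fun acc kind =>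
          if (by_kind.getD kind []).isEmpty then acc
          else ((by_kind.getD kind []).foldl (fun a s => a ++ ["- " ++ pvBodyOf s])
                  (acc ++ ["**" ++ kind ++ "**"])) ++ [""]) acc) lines
    PySem.Str.rstrip (PySem.Str.join "\n" lines) ++ "\n"

-- ===== PORT B =====
def pvKindBlock (srcs : List (List (String × String))) (kind : String) : List String :=
  let matched := srcs.filter (fun s => pvKindOf s == kind)
  if matched.isEmpty then []
  else ["**" ++ kind ++ "**"] ++ matched.map (fun s => "- " ++ pvBodyOf s) ++ [""]

def pvTargetSection (per_target : List (String × List (List (String × String)))) (ta : String) : List String :=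
  let srcs := pvGetSrcs per_target ta
  if srcs.isEmpty then ["### " ++ ta, "", pvNoSrcMsg ta, ""]
  else ["### " ++ ta, ""] ++ pvKinds.flatMap (pvKindBlock srcs)

def render_pack_py_alt (target_aliases : List String) (floor_aliases : List String) (per_target : List (String × List (List (String × String)))) : String :=
  let floor :=
    if floor_aliases.isEmpty then [pvNoFloor]
    else pvFloorHdr :: floor_aliases.map (fun a => "- " ++ a)
  let head := pvHeader ++ floor ++ ["", "## Targets (" ++ PySem.Int.toStr (target_aliases.length : Int) ++ ")", ""]
  let tail :=
    if target_aliases.isEmpty then [pvNoTarget, ""]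
    else target_aliases.flatMap (pvTargetSection per_target)
  PySem.Str.rstrip (PySem.Str.join "\n" (head ++ tail)) ++ "\n"

-- ===== PRECONDITION & SPEC =====
-- Pre_ excludes exactly the inputs on which Python A raises KeyError: a source (of a looked-up
-- target) missing the "kind" key, or missing "body" while its kind is one of the five rendered kinds.
def Pre_render_pack_py (target_aliases : List String) (floor_aliases : List String) (per_target : List (String × List (List (String × String)))) : Prop :=
  (target_aliases.all (fun ta => (pvGetSrcs per_target ta).all (fun s =>
     ((PySem.Dict.mk s).get? "kind").isSome &&
     (!(pvKinds.contains (pvKindOf s)) || ((PySem.Dict.mk s).get? "body").isSome)))) = true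
instance (target_aliases : List String) (floor_aliases : List String) (per_target : List (String × List (List (String × String)))) : Decidable (Pre_render_pack_py target_aliases floor_aliases per_target) := by unfold Pre_render_pack_py; infer_instance

def pvWitness_render_pack_py : List String × List String × (List (String × List (List (String × String)))) :=
  (["t1", "t2"], ["fr-1"], [("t1", [[("kind", "anchored_harvest"), ("body", "b1")], [("kind", "active_spec"), ("body", "b2")]])])

def Spec_render_pack_py (target_aliases : List String) (floor_aliases : List String) (per_target : List (String × List (List (String × String)))) (out : String) : Prop := out = render_pack_py_alt target_aliases floor_aliases per_target
instance (target_aliases : List String) (floor_aliases : List String) (per_target : List (String × List (List (String × String)))) (out : String) : Decidable (Spec_render_pack_py target_aliases floor_aliases per_target out) := by unfold Spec_render_pack_py; infer_instance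

-- ===== CLAIM (what is proved, stated in full; the proofs are below) =====
def Claim_equal_render_pack_py : Prop := ∀ (target_aliases : List String) (floor_aliases : List String) (per_target : List (String × List (List (String × String)))), Dom_render_pack_py target_aliases floor_aliases per_target → Pre_render_pack_py target_aliases floor_aliases per_target → Spec_render_pack_py target_aliases floor_aliases per_target (render_pack_py target_aliases floor_aliases per_target)

-- ===== LEMMAS AND PROOFS =====

-- A's by_kind grouping looked up at a kind is exactly B's direct filter of srcs
theorem pv_by_kind_getD (srcs : List (List (String × String))) (k : String) :
    (srcs.foldl (fun d s => d.modify (pvKindOf s) [] (· ++ [s])) PySem.Dict.empty).getD k []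
      = srcs.filter (fun s => pvKindOf s == k) := by
  have h := PySem.Dict.getD_foldl_modify_append
    (l := srcs.map (fun s => (pvKindOf s, s))) (d := PySem.Dict.empty) (c := k)
  simpa [List.foldl_map, List.filter_map, List.map_map, Function.comp_def] using h

-- A's per-kind accumulator step appends exactly B's pvKindBlock
theorem pv_kind_step (srcs : List (List (String × String))) (acc : List String) (k : String) :
    (if ((srcs.foldl (fun d s => d.modify (pvKindOf s) [] fun x => x ++ [s]) PySem.Dict.empty).getD k []).isEmpty = true then acc
     else List.foldl (fun a s => a ++ ["- " ++ pvBodyOf s]) (acc ++ ["**" ++ k ++ "**"])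
            ((srcs.foldl (fun d s => d.modify (pvKindOf s) [] fun x => x ++ [s]) PySem.Dict.empty).getD k []) ++ [""])
      = acc ++ pvKindBlock srcs k := by
  rw [pv_by_kind_getD]
  by_cases h : (srcs.filter (fun s => pvKindOf s == k)).isEmpty
  · simp [pvKindBlock, h]
  · rw [if_neg h, PySem.List.foldl_append_singleton_eq_map]
    simp [pvKindBlock, h]

-- A's per-target accumulator step (zeta-reduced, as it appears in the unfolded port) appends exactly B's pvTargetSection
theorem pv_target_step (per_target : List (String × List (List (String × String)))) (acc : List String) (ta : String) :
    (if (pvGetSrcs per_target ta).isEmpty = true then acc ++ ["### " ++ ta, ""] ++ [pvNoSrcMsg ta, ""]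
     else
       List.foldl
         (fun acc kind =>
           if ((List.foldl (fun d s => d.modify (pvKindOf s) [] fun x => x ++ [s]) PySem.Dict.empty (pvGetSrcs per_target ta)).getD kind []).isEmpty = true then acc
           else
             List.foldl (fun a s => a ++ ["- " ++ pvBodyOf s]) (acc ++ ["**" ++ kind ++ "**"])
                 ((List.foldl (fun d s => d.modify (pvKindOf s) [] fun x => x ++ [s]) PySem.Dict.empty (pvGetSrcs per_target ta)).getD kind []) ++ [""])
         (acc ++ ["### " ++ ta, ""]) pvKinds)
      = acc ++ pvTargetSection per_target ta := by
  by_cases h : (pvGetSrcs per_target ta).isEmpty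
  · simp [pvTargetSection, h]
  · rw [if_neg h]
    have hc := PySem.List.foldl_congr_mem pvKinds _
      (fun acc kind => acc ++ pvKindBlock (pvGetSrcs per_target ta) kind)
      (acc ++ ["### " ++ ta, ""])
      (fun acc kind _ => pv_kind_step (pvGetSrcs per_target ta) acc kind)
    rw [hc, PySem.List.foldl_append_eq_flatMap]
    simp [pvTargetSection, h]

-- A's whole target loop equals init ++ B's flatMap of sections
theorem pv_targets_fold (per_target : List (String × List (List (String × String)))) (tas : List String) (init : List String) :
    List.foldl
      (fun acc ta =>
        if (pvGetSrcs per_target ta).isEmpty = true then acc ++ ["### " ++ ta, ""] ++ [pvNoSrcMsg ta, ""]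
        else
          List.foldl
            (fun acc kind =>
              if ((List.foldl (fun d s => d.modify (pvKindOf s) [] fun x => x ++ [s]) PySem.Dict.empty (pvGetSrcs per_target ta)).getD kind []).isEmpty = true then acc
              else
                List.foldl (fun a s => a ++ ["- " ++ pvBodyOf s]) (acc ++ ["**" ++ kind ++ "**"])
                    ((List.foldl (fun d s => d.modify (pvKindOf s) [] fun x => x ++ [s]) PySem.Dict.empty (pvGetSrcs per_target ta)).getD kind []) ++ [""])
            (acc ++ ["### " ++ ta, ""]) pvKinds)
      init tas = init ++ tas.flatMap (pvTargetSection per_target) := by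
  have hc := PySem.List.foldl_congr_mem tas _
    (fun acc ta => acc ++ pvTargetSection per_target ta) init
    (fun acc ta _ => pv_target_step per_target acc ta)
  rw [hc, PySem.List.foldl_append_eq_flatMap]

theorem render_pack_py_eq_alt (target_aliases : List String) (floor_aliases : List String) (per_target : List (String × List (List (String × String)))) :
    render_pack_py target_aliases floor_aliases per_target = render_pack_py_alt target_aliases floor_aliases per_target := by
  unfold render_pack_py render_pack_py_alt
  have hfloor :
      (if floor_aliases.isEmpty then pvHeader ++ [pvNoFloor]
       else floor_aliases.foldl (fun acc a => acc ++ ["- " ++ a]) (pvHeader ++ [pvFloorHdr]))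
      = pvHeader ++ (if floor_aliases.isEmpty then [pvNoFloor] else pvFloorHdr :: floor_aliases.map (fun a => "- " ++ a)) := by
    split_ifs with h
    · rfl
    · rw [PySem.List.foldl_append_singleton_eq_map]; simp
  simp only [hfloor]
  split_ifs with h1 h2 h3 <;> first
    | (rw [pv_targets_fold]; simp)
    | simp

-- ===== VERDICT (by name: the statement is the Claim_ definition above) =====
theorem render_pack_py_spec : Claim_equal_render_pack_py := by
  intro ta fa pt _ _
  unfold Spec_render_pack_py
  exact render_pack_py_eq_alt ta fa pt
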